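-- pv_equiv track=rewrite | github.com/DINGIRABZU/ABZU | operator_api.py | _format_diff_path
-- ===== SOURCE A (Python) =====
-- from typing import Any, Awaitable, Callable, Mapping, Sequence
--
-- def _format_diff_path(segments: Sequence[str]) -> str:
--     """Return a human-readable dotted path for diff segments."""
--
--     if not segments:
--         return "<root>"
--
--     parts: list[str] = []
--     for segment in segments:
--         if not segment:
--             continue
--         if segment.startswith("["):
--             if parts:
--                 parts[-1] = parts[-1] + segment
--             else:
--                 parts.append(segment)
--         else:
--             parts.append(segment)
--
--     if not parts:
--         return "<root>"
--
--     formatted = parts[0]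
--     for token in parts[1:]:
--         if token.startswith("["):
--             formatted += token
--         else:
--             formatted += f".{token}"
--     return formatted
-- ===== SOURCE B (Python) =====
-- def _format_diff_path(segments):
--     """Return a human-readable dotted path for diff segments."""
--     formatted = None
--     for segment in segments:
--         if not segment:
--             continue
--         if formatted is None:
--             formatted = segment
--         elif segment.startswith("["):
--             formatted += segment
--         else:
--             formatted += "." + segment
--     return "<root>" if formatted is None else formatted
-- ===== Notes on version B (the rewrite author's own statement) =====
-- stated objective: simpler
-- what changed: Replaces A's two-phase build (merge bracket segments into a parts list, then re-join with dots) by a single pass that appends each non-empty segment directly onto one accumulator string, using None to detect the no-content case for both empty and all-empty inputs.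
import Mathlib
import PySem

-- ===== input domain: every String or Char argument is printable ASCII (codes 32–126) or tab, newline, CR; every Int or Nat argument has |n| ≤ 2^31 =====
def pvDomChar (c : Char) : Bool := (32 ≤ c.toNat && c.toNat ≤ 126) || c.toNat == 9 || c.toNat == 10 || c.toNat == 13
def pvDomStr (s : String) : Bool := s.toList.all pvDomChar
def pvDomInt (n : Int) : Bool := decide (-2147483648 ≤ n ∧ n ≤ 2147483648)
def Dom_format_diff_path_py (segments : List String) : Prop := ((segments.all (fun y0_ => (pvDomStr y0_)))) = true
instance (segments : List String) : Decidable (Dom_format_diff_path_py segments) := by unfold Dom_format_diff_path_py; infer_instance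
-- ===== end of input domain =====

-- B replaces A's two-phase build (merge bracket segments into a parts list, then re-join)
-- with a single accumulator pass; objective: simpler.

-- ===== PORT A =====
-- segment.startswith("[")
def pvStartsLb (s : List Char) : Bool := PySem.Chars.startswith s ['[']

-- parts[-1] = parts[-1] + seg (in-place update of the last element)
def pvUpdLast : List (List Char) → List Char → List (List Char)
  | [], _ => []
  | [x], seg => [x ++ seg]
  | x :: y :: xs, seg => x :: pvUpdLast (y :: xs) seg

-- one iteration of A's first loop
def pvStepA (parts : List (List Char)) (seg : List Char) : List (List Char) :=
  if seg = [] then parts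
  else if pvStartsLb seg then
    match parts with
    | [] => parts ++ [seg]
    | _ :: _ => pvUpdLast parts seg
  else parts ++ [seg]

-- one iteration of A's second (join) loop
def pvJStep (f : List Char) (tok : List Char) : List Char :=
  if pvStartsLb tok then f ++ tok else f ++ '.' :: tok

def format_diff_path_py (segments : List String) : String :=
  if segments = [] then "<root>"
  else
    match (segments.map String.toList).foldl pvStepA [] with
    | [] => "<root>"
    | h :: t => String.ofList (t.foldl pvJStep h)

-- ===== PORT B =====
-- one iteration of B's single loop; none = "no content emitted yet"
def pvStepB (acc : Option (List Char)) (seg : List Char) : Option (List Char) :=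
  if seg = [] then acc
  else
    match acc with
    | none => some seg
    | some r => if pvStartsLb seg then some (r ++ seg) else some (r ++ '.' :: seg)

def format_diff_path_py_alt (segments : List String) : String :=
  match segments.foldl (fun acc s => pvStepB acc s.toList) none with
  | none => "<root>"
  | some r => String.ofList r

-- ===== PRECONDITION & SPEC =====
def Spec_format_diff_path_py (segments : List String) (out : String) : Prop := out = format_diff_path_py_alt segments
instance (segments : List String) (out : String) : Decidable (Spec_format_diff_path_py segments out) := by unfold Spec_format_diff_path_py; infer_instance

-- ===== CLAIM (what is proved, stated in full; the proofs are below) =====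
def Claim_equal_format_diff_path_py : Prop := ∀ (segments : List String), Dom_format_diff_path_py segments → Spec_format_diff_path_py segments (format_diff_path_py segments)

-- ===== LEMMAS AND PROOFS =====

-- A's joined string, as an option: none iff parts is empty
def pvJoin0 : List (List Char) → Option (List Char)
  | [] => none
  | h :: t => some (t.foldl pvJStep h)

theorem pvUpdLast_append_singleton (t : List (List Char)) (x seg : List Char) :
    pvUpdLast (t ++ [x]) seg = t ++ [x ++ seg] := by
  induction t with
  | nil => rfl
  | cons a t ih =>
    cases t with
    | nil => rfl
    | cons b t => simpa [pvUpdLast] using ih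

theorem pvStartsLb_cons (c : Char) (l : List Char) :
    pvStartsLb (c :: l) = decide (c = '[') := by
  by_cases h : c = '['
  · subst h
    have h2 : PySem.Chars.startswith ('[' :: l) ['['] = true :=
      (PySem.Chars.startswith_iff _ _).mpr (List.cons_prefix_cons.mpr ⟨rfl, List.nil_prefix⟩)
    simp [pvStartsLb, h2]
  · have : pvStartsLb (c :: l) = false := by
      apply Bool.eq_false_iff.mpr
      intro hc
      have := (PySem.Chars.startswith_iff _ _).mp hc
      rcases List.cons_prefix_cons.mp this with ⟨hc', _⟩
      exact h hc'.symm
    simp [this, h]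

theorem pvStartsLb_append (x seg : List Char) (hx : x ≠ []) :
    pvStartsLb (x ++ seg) = pvStartsLb x := by
  cases x with
  | nil => exact absurd rfl hx
  | cons c cs => rw [List.cons_append, pvStartsLb_cons, pvStartsLb_cons]

-- appending a "[..." segment to the last part appends it to the joined string
theorem pvJoin0_updLast (h : List Char) (t : List (List Char)) (seg : List Char)
    (hne : ∀ x ∈ h :: t, x ≠ []) :
    pvJoin0 (pvUpdLast (h :: t) seg) = some ((t.foldl pvJStep h) ++ seg) := by
  induction t using List.reverseRecOn with
  | nil => simp [pvUpdLast, pvJoin0]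
  | append_singleton t x ih =>
    have hx : x ≠ [] := hne x (by simp)
    have : pvUpdLast (h :: (t ++ [x])) seg = h :: (t ++ [x ++ seg]) := by
      have := pvUpdLast_append_singleton (h :: t) x seg
      simpa using this
    rw [this]
    simp only [pvJoin0, List.foldl_append, List.foldl_cons, List.foldl_nil]
    simp only [pvJStep, pvStartsLb_append x seg hx]
    split_ifs <;> simp

theorem pvStepA_ne_nil (parts : List (List Char)) (seg : List Char) (h : parts ≠ []) :
    pvStepA parts seg ≠ [] := by
  cases parts with
  | nil => exact absurd rfl h
  | cons a t =>
    simp only [pvStepA]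
    split_ifs
    · simp
    · cases t with
      | nil => simp [pvUpdLast]
      | cons b t => simp [pvUpdLast]
    · simp

theorem pvUpdLast_mem_ne_nil (l : List (List Char)) (seg : List Char)
    (hne : ∀ x ∈ l, x ≠ []) : ∀ x ∈ pvUpdLast l seg, x ≠ [] := by
  induction l with
  | nil => simp [pvUpdLast]
  | cons a l ih =>
    cases l with
    | nil =>
      intro x hx
      simp [pvUpdLast] at hx
      subst hx
      simp [hne a (by simp)]
    | cons b l =>
      intro x hx
      simp only [pvUpdLast, List.mem_cons] at hx
      rcases hx with rfl | hx
      · exact hne _ (by simp)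
      · exact ih (fun y hy => hne y (by simp [hy])) x hx

theorem pvStepA_mem_ne_nil (parts : List (List Char)) (seg : List Char)
    (hne : ∀ x ∈ parts, x ≠ []) : ∀ x ∈ pvStepA parts seg, x ≠ [] := by
  simp only [pvStepA]
  split_ifs with h1 h2
  · exact hne
  · cases parts with
    | nil => intro x hx; simp at hx; subst hx; exact h1
    | cons a t => exact pvUpdLast_mem_ne_nil (a :: t) seg hne
  · intro x hx
    rcases List.mem_append.mp hx with hx | hx
    · exact hne x hx
    · simp at hx; subst hx; exact h1

-- main invariant: from a nonempty parts list, A's remaining first loop followed by the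
-- join equals B's remaining single loop started from the join of the current parts
theorem pvMain (rest : List (List Char)) : ∀ parts : List (List Char), parts ≠ [] →
    (∀ x ∈ parts, x ≠ []) →
    pvJoin0 (rest.foldl pvStepA parts) = rest.foldl pvStepB (pvJoin0 parts) := by
  induction rest with
  | nil => intro parts _ _; rfl
  | cons seg rest ih =>
    intro parts hp hne
    obtain ⟨h, t, rfl⟩ : ∃ h t, parts = h :: t := by
      cases parts with
      | nil => exact absurd rfl hp
      | cons h t => exact ⟨h, t, rfl⟩
    simp only [List.foldl_cons]
    rw [ih _ (pvStepA_ne_nil _ _ hp) (pvStepA_mem_ne_nil _ _ hne)]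
    congr 1
    by_cases h1 : seg = []
    · simp [pvStepA, pvStepB, h1, pvJoin0]
    · by_cases h2 : pvStartsLb seg
      · rw [show pvStepA (h :: t) seg = pvUpdLast (h :: t) seg by simp [pvStepA, h1, h2]]
        rw [pvJoin0_updLast h t seg hne]
        simp [pvStepB, h1, pvJoin0, h2]
      · rw [show pvStepA (h :: t) seg = (h :: t) ++ [seg] by simp [pvStepA, h1, h2]]
        simp [pvJoin0, pvStepB, h1, h2, List.foldl_append, pvJStep]

-- both sides, from the empty start, agree as options
theorem pvStart (segs : List (List Char)) :
    pvJoin0 (segs.foldl pvStepA []) = segs.foldl pvStepB none := by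
  induction segs with
  | nil => rfl
  | cons seg segs ih =>
    by_cases h1 : seg = []
    · simpa [pvStepA, pvStepB, h1] using ih
    · have hA : pvStepA [] seg = [seg] := by
        simp [pvStepA, h1]
      have hB : pvStepB none seg = some seg := by simp [pvStepB, h1]
      simp only [List.foldl_cons, hA, hB]
      exact pvMain segs [seg] (by simp) (by simpa using h1)

-- ===== VERDICT (by name: the statement is the Claim_ definition above) =====
theorem format_diff_path_py_spec : Claim_equal_format_diff_path_py := by
  intro segments _
  unfold Spec_format_diff_path_py format_diff_path_py format_diff_path_py_alt
  have hfold : segments.foldl (fun acc s => pvStepB acc s.toList) none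
      = (segments.map String.toList).foldl pvStepB none := by
    rw [List.foldl_map]
  rw [hfold, ← pvStart]
  by_cases hs : segments = []
  · subst hs; rfl
  · simp only [hs, if_false]
    cases hmatch : (segments.map String.toList).foldl pvStepA [] with
    | nil => simp [pvJoin0]
    | cons h t => simp [pvJoin0]
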